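-- pv_equiv track=rewrite | github.com/sx-phughes/accounting | payables/Interface/functions.py | construct_border_line
-- ===== SOURCE A (Python) =====
-- def construct_border_line(col_widths: list[int]) -> str:
--     total_len = sum(col_widths) + 3 * len(col_widths) + 1
--     border = ["-" for i in range(total_len)]
--     border[0] = "+"
--     border[-1] = "+"
--     running_sum = 0
--     for i in col_widths:
--         running_sum += i + 3
--         border[running_sum] = "+"
--
--     border_str = "".join(border)
--     return border_str
-- ===== SOURCE B (Python) =====
-- def construct_border_line(col_widths: list[int]) -> str:
--     return "+" + "".join("-" * (w + 2) + "+" for w in col_widths)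
-- ===== Notes on version B (the rewrite author's own statement) =====
-- stated objective: idiomatic
-- what changed: B concatenates one '-'*(w+2)+'+' string segment per column instead of preallocating a per-character dash list of computed total length, poking '+' at running-sum indices and joining; Pre_ excludes widths below -2 (not meaningful column widths), on which A raises IndexError or returns accidental buffer contents via wraparound/overwritten indices.
-- outside the precondition, e.g. on construct_border_line([-3]): A returns '+', B returns '++'; on construct_border_line([-4, 5]): A returns '+------+', B returns '++-------+'
import Mathlib
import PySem

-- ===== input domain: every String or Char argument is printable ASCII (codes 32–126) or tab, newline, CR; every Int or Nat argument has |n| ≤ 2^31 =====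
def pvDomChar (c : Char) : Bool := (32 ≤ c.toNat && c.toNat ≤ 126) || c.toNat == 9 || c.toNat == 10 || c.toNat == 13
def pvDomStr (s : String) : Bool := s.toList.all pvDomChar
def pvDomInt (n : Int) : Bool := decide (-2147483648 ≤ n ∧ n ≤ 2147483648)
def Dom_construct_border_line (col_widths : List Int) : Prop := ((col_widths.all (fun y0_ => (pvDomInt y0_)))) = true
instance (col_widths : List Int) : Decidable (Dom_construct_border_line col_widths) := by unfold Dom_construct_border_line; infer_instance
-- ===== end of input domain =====

-- B assembles the border by concatenating one "-"*(w+2)+"+" segment per column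
-- instead of preallocating a dash buffer and poking '+' at running-sum indices
-- (idiomatic; same asymptotic cost).


-- ===== PORT A =====
-- Python `border[i] = c` with a possibly negative index; an out-of-range index
-- (IndexError in Python) leaves the list unchanged here — unreachable under Pre_.
def pySetChar (l : List Char) (i : Int) (c : Char) : List Char :=
  let j : Int := if i < 0 then i + l.length else i
  if 0 ≤ j ∧ j < l.length then l.set j.toNat c else l

def construct_border_line (col_widths : List Int) : String :=
  let total_len : Int := col_widths.sum + 3 * col_widths.length + 1
  -- ["-" for i in range(total_len)] : total_len copies of '-' (none if total_len < 0)
  let border : List Char := List.replicate total_len.toNat '-'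
  let border := pySetChar border 0 '+'
  let border := pySetChar border (-1) '+'
  let st := col_widths.foldl (fun (st : Int × List Char) (i : Int) =>
      let rs := st.1 + i + 3
      (rs, pySetChar st.2 rs '+')) ((0 : Int), border)
  String.ofList st.2

-- ===== PORT B =====
-- "+" + "".join("-" * (w + 2) + "+" for w in col_widths)
def construct_border_line_alt (col_widths : List Int) : String :=
  String.ofList ('+' :: col_widths.flatMap (fun w => List.replicate (w + 2).toNat '-' ++ ['+']))

-- ===== PRECONDITION & SPEC =====
-- Pre_ excludes widths below -2 (for w ≥ -2 every column segment has nonnegative length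
-- w+2 and A's indices stay in range): below that A raises IndexError on most inputs and on
-- the rest its running-sum / negative-index buffer writes yield accidental values.
def Pre_construct_border_line (col_widths : List Int) : Prop :=
  ∀ w ∈ col_widths, -2 ≤ w
instance (col_widths : List Int) : Decidable (Pre_construct_border_line col_widths) := by
  unfold Pre_construct_border_line; infer_instance

def pvWitness_construct_border_line : List Int := [3, 1, 0]

def Spec_construct_border_line (col_widths : List Int) (out : String) : Prop := out = construct_border_line_alt col_widths
instance (col_widths : List Int) (out : String) : Decidable (Spec_construct_border_line col_widths out) := by unfold Spec_construct_border_line; infer_instance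

-- ===== CLAIM (what is proved, stated in full; the proofs are below) =====
def Claim_equal_construct_border_line : Prop := ∀ (col_widths : List Int), Dom_construct_border_line col_widths → Pre_construct_border_line col_widths → Spec_construct_border_line col_widths (construct_border_line col_widths)

-- ===== LEMMAS AND PROOFS =====

-- Structural form of A's fold (buffer component only).
def setsFrom : List Int → Int → List Char → List Char
  | [], _, buf => buf
  | w :: ws, a, buf => setsFrom ws (a + w + 3) (pySetChar buf (a + w + 3) '+')

theorem foldl_eq_setsFrom (ws : List Int) (a : Int) (buf : List Char) :
    (ws.foldl (fun (st : Int × List Char) (i : Int) =>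
      let rs := st.1 + i + 3
      (rs, pySetChar st.2 rs '+')) (a, buf)).2 = setsFrom ws a buf := by
  induction ws generalizing a buf with
  | nil => rfl
  | cons w ws ih => simpa [setsFrom] using ih (a + w + 3) (pySetChar buf (a + w + 3) '+')

theorem pySetChar_append (p q : List Char) (j : Int) (c : Char) (hj : 0 ≤ j) :
    pySetChar (p ++ q) (↑p.length + j) c = p ++ pySetChar q j c := by
  unfold pySetChar
  have h1 : ¬ ((↑p.length + j : Int) < 0) := by omega
  have h2 : ¬ (j < 0) := by omega
  simp only [if_neg h1, if_neg h2, List.length_append]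
  by_cases h : j < (q.length : Int)
  · rw [if_pos ⟨by omega, by push_cast; omega⟩, if_pos ⟨hj, h⟩]
    have hN : (↑p.length + j).toNat = p.length + j.toNat := by omega
    rw [hN]
    simp
  · rw [if_neg (by push_cast; omega), if_neg (by omega)]

theorem pySetChar_zero (c0 c : Char) (l : List Char) :
    pySetChar (c0 :: l) 0 c = c :: l := by
  simp [pySetChar]

theorem pySetChar_last (p : List Char) (d c : Char) :
    pySetChar (p ++ [d]) (-1) c = p ++ [c] := by
  unfold pySetChar
  have hlen : ((p ++ [d]).length : Int) = ↑p.length + 1 := by simp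
  have hneg : ((-1 : Int) < 0) := by omega
  simp only [if_pos hneg, hlen]
  rw [if_pos ⟨by omega, by omega⟩]
  have hN : (-1 + (↑p.length + 1) : Int).toNat = p.length + 0 := by omega
  rw [hN]
  simp

theorem setsFrom_append (ws : List Int) (a : Int) (p q : List Char)
    (hws : ∀ w ∈ ws, -2 ≤ w) (ha : -1 ≤ a) :
    setsFrom ws (↑p.length + a) (p ++ q) = p ++ setsFrom ws a q := by
  induction ws generalizing a q with
  | nil => rfl
  | cons w ws ih =>
    have hw : -2 ≤ w := hws w (by simp)
    simp only [setsFrom]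
    have hrw : (↑p.length + a + w + 3 : Int) = ↑p.length + (a + w + 3) := by ring
    rw [hrw, pySetChar_append p q (a + w + 3) '+' (by omega)]
    exact ih (a + w + 3) (pySetChar q (a + w + 3) '+')
      (fun x hx => hws x (by simp [hx])) (by omega)

theorem sum_lb (ws : List Int) (hws : ∀ w ∈ ws, -2 ≤ w) : -2 * (ws.length : Int) ≤ ws.sum := by
  induction ws with
  | nil => simp
  | cons w t ih =>
    have := hws w (by simp)
    have := ih (fun x hx => hws x (by simp [hx]))
    simp only [List.sum_cons, List.length_cons]
    push_cast
    omega

theorem setsFrom_main (ws : List Int) (hne : ws ≠ []) (hws : ∀ w ∈ ws, -2 ≤ w) :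
    setsFrom ws (-1) (List.replicate (ws.sum + 3 * ws.length - 1).toNat '-' ++ ['+'])
      = ws.flatMap (fun w => List.replicate (w + 2).toNat '-' ++ ['+']) := by
  induction ws with
  | nil => exact absurd rfl hne
  | cons w t ih =>
    have hw : -2 ≤ w := hws w (by simp)
    cases t with
    | nil =>
      -- single column: the set at index w+2 rewrites the final '+' with '+'
      simp only [setsFrom, List.flatMap_cons, List.flatMap_nil, List.append_nil]
      have hsum : ((w :: ([] : List Int)).sum + 3 * ((w :: ([] : List Int)).length : Int) - 1)
          = w + 2 := by simp; ring
      rw [hsum]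
      have hidx : (-1 + w + 3 : Int) = ↑(List.replicate (w + 2).toNat '-').length + 0 := by
        simp only [List.length_replicate]; omega
      rw [hidx, pySetChar_append _ ['+'] 0 '+' le_rfl]
      simp [pySetChar]
    | cons w' t' =>
      set t : List Int := w' :: t' with ht
      have htne : t ≠ [] := by simp [ht]
      have hwst : ∀ x ∈ t, -2 ≤ x := fun x hx => hws x (by simp [hx])
      have hts : -2 * (t.length : Int) ≤ t.sum := sum_lb t hwst
      have htl : (1 : Int) ≤ t.length := by simp [ht]
      have hbuf : List.replicate ((w :: t).sum + 3 * ((w :: t).length : Int) - 1).toNat '-' ++ ['+']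
          = List.replicate (w + 2).toNat '-'
              ++ ('-' :: (List.replicate (t.sum + 3 * t.length - 1).toNat '-' ++ ['+'])) := by
        have hsplit : ((w :: t).sum + 3 * ((w :: t).length : Int) - 1).toNat
            = (w + 2).toNat + (1 + (t.sum + 3 * t.length - 1).toNat) := by
          simp only [List.sum_cons, List.length_cons]
          push_cast
          omega
        rw [hsplit, List.replicate_add, List.replicate_add, List.replicate_one]
        simp
      rw [hbuf]
      simp only [setsFrom]
      have hidx : (-1 + w + 3 : Int) = ↑(List.replicate (w + 2).toNat '-').length + 0 := by
        simp only [List.length_replicate]; omega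
      rw [hidx, pySetChar_append _ _ 0 '+' le_rfl, pySetChar_zero]
      have hasc : List.replicate (w + 2).toNat '-'
            ++ '+' :: (List.replicate (t.sum + 3 * t.length - 1).toNat '-' ++ ['+'])
          = (List.replicate (w + 2).toNat '-' ++ ['+'])
            ++ (List.replicate (t.sum + 3 * t.length - 1).toNat '-' ++ ['+']) := by simp
      have hidx2 : (↑(List.replicate (w + 2).toNat '-').length + 0 : Int)
          = ↑(List.replicate (w + 2).toNat '-' ++ ['+']).length + (-1) := by
        simp only [List.length_replicate, List.length_append, List.length_cons,
          List.length_nil]; omega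
      rw [hasc, hidx2, setsFrom_append t (-1) _ _ hwst (by omega), ih htne hwst]
      simp

theorem construct_border_line_nil : construct_border_line [] = construct_border_line_alt [] := by
  decide

theorem construct_border_line_spec_aux (ws : List Int) (hws : ∀ w ∈ ws, -2 ≤ w) :
    construct_border_line ws = construct_border_line_alt ws := by
  cases ws with
  | nil => exact construct_border_line_nil
  | cons w t =>
    have hw : -2 ≤ w := hws w (by simp)
    set ws := w :: t with hws'
    have hS : -2 * (ws.length : Int) ≤ ws.sum := sum_lb ws hws
    have hn : (1 : Int) ≤ ws.length := by simp [hws']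
    unfold construct_border_line
    simp only
    rw [foldl_eq_setsFrom]
    have hL : (ws.sum + 3 * (ws.length : Int) + 1).toNat
        = (ws.sum + 3 * (ws.length : Int) - 1).toNat + 2 := by omega
    have hrep : List.replicate ((ws.sum + 3 * (ws.length : Int) - 1).toNat + 2) '-'
        = '-' :: (('+' :: List.replicate (ws.sum + 3 * (ws.length : Int) - 1).toNat '-').tail ++ ['-']) := by
      rw [List.replicate_succ, List.replicate_succ']
      simp
    rw [hL, hrep, pySetChar_zero]
    rw [show ('+' :: (('+' :: List.replicate (ws.sum + 3 * (ws.length : Int) - 1).toNat '-').tail ++ ['-']) : List Char)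
        = ('+' :: List.replicate (ws.sum + 3 * (ws.length : Int) - 1).toNat '-') ++ ['-'] by simp]
    rw [pySetChar_last]
    rw [show (('+' :: List.replicate (ws.sum + 3 * (ws.length : Int) - 1).toNat '-') ++ ['+'] : List Char)
        = ['+'] ++ (List.replicate (ws.sum + 3 * (ws.length : Int) - 1).toNat '-' ++ ['+']) by simp]
    rw [show (0 : Int) = ↑(['+'] : List Char).length + (-1) by simp]
    rw [setsFrom_append ws (-1) ['+'] _ hws (by omega)]
    rw [setsFrom_main ws (by simp [hws']) hws]
    rfl

-- ===== VERDICT (by name: the statement is the Claim_ definition above) =====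
theorem construct_border_line_spec : Claim_equal_construct_border_line := by
  intro ws _ hpre
  exact construct_border_line_spec_aux ws hpre
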